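-- pv_equiv track=rewrite | github.com/yusuke0127/body-size-pred | api/utils/size_recommender.py | size_recommender_top
-- ===== SOURCE A (Python) =====
-- w_top_size_chart = [
--     {"size": "XS", "bust": (74, 80), "waist": (57, 63), "height": (149, 156)},
--     {"size": "S", "bust": (77, 83), "waist": (60, 66), "height": (153, 160)},
--     {"size": "M", "bust": (80, 86), "waist": (63, 69), "height": (153, 160)},
--     {"size": "L", "bust": (86, 92), "waist": (69, 75), "height": (159, 166)},
--     {"size": "XL", "bust": (92, 98), "waist": (75, 81), "height": (159, 166)},
--     {"size": "XXL", "bust": (98, 104), "waist": (81, 87), "height": (159, 166)},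
--     {"size": "3XL", "bust": (104, 110), "waist": (87, 93), "height": (159, 166)}
--
-- ]
--
-- m_top_size_chart = [
--     {"size": "XS", "bust": (78, 84), "waist": (66, 72), "height": (155, 165)},
--     {"size": "S", "bust": (80, 88), "waist": (68, 76), "height": (155, 165)},
--     {"size": "M", "bust": (88, 96), "waist": (76, 84), "height": (165, 175)},
--     {"size": "L", "bust": (96, 104), "waist": (84, 92), "height": (175, 185)},
--     {"size": "XL", "bust": (104, 112), "waist": (92, 100), "height": (175, 185)},
--     {"size": "XXL", "bust": (112, 120), "waist": (100, 108), "height": (175, 185)},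
--     {"size": "3XL", "bust": (120, 128), "waist": (108, 116), "height": (175, 185)},
--     {"size": "4XL", "bust": (128, 136), "waist": (116, 124), "height": (175, 185)}
-- ]
--
-- def in_range(value, range_tuple):
--     return range_tuple[0] <= value <= range_tuple[1]
--
-- def size_recommender_top(bust_size, waist_size, height, gender):
--     """
--     Recommend top sizes based on bust, waist, height, and gender.
--
--     Parameters:
--     bust_size (int): Bust measurement
--     waist_size (int): Waist measurement
--     height (int): Height measurement
--     gender (str): Gender ('F' for female, 'M' for male)
--
--     Returns:
--     list: Recommended top sizes
--     """
--     matching_sizes = []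
--     size_chart = w_top_size_chart if gender == "F" else m_top_size_chart
--     for size in size_chart:
--         score = 0
--         if in_range(bust_size, size["bust"]):
--             score += 1
--         if in_range(waist_size, size["waist"]):
--             score += 1
--         if in_range(height, size["height"]):
--             score += 1
--         if score > 0:
--             matching_sizes.append({"size": size["size"], "score": score})
--
--     matching_sizes.sort(key=lambda x: x["score"], reverse=True)
--
--     if matching_sizes:
--         best_score = matching_sizes[0]["score"]
--         best_matches = [size["size"] for size in matching_sizes if size["score"] == best_score]
--         return best_matches
--
--     return []
-- ===== SOURCE B (Python) =====
-- w_top_size_chart = [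
--     {"size": "XS", "bust": (74, 80), "waist": (57, 63), "height": (149, 156)},
--     {"size": "S", "bust": (77, 83), "waist": (60, 66), "height": (153, 160)},
--     {"size": "M", "bust": (80, 86), "waist": (63, 69), "height": (153, 160)},
--     {"size": "L", "bust": (86, 92), "waist": (69, 75), "height": (159, 166)},
--     {"size": "XL", "bust": (92, 98), "waist": (75, 81), "height": (159, 166)},
--     {"size": "XXL", "bust": (98, 104), "waist": (81, 87), "height": (159, 166)},
--     {"size": "3XL", "bust": (104, 110), "waist": (87, 93), "height": (159, 166)}
--
-- ]
--
-- m_top_size_chart = [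
--     {"size": "XS", "bust": (78, 84), "waist": (66, 72), "height": (155, 165)},
--     {"size": "S", "bust": (80, 88), "waist": (68, 76), "height": (155, 165)},
--     {"size": "M", "bust": (88, 96), "waist": (76, 84), "height": (165, 175)},
--     {"size": "L", "bust": (96, 104), "waist": (84, 92), "height": (175, 185)},
--     {"size": "XL", "bust": (104, 112), "waist": (92, 100), "height": (175, 185)},
--     {"size": "XXL", "bust": (112, 120), "waist": (100, 108), "height": (175, 185)},
--     {"size": "3XL", "bust": (120, 128), "waist": (108, 116), "height": (175, 185)},
--     {"size": "4XL", "bust": (128, 136), "waist": (116, 124), "height": (175, 185)}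
-- ]
--
--
-- def size_recommender_top(bust_size, waist_size, height, gender):
--     """Set-algebra relaxation: build the three criterion index-sets, then probe
--     the relaxation levels all-three / any-two / any-one and report the first
--     nonempty one (in chart order).  No scores, no max, no sort."""
--     chart = w_top_size_chart if gender == "F" else m_top_size_chart
--     B = {i for i, e in enumerate(chart) if e["bust"][0] <= bust_size <= e["bust"][1]}
--     W = {i for i, e in enumerate(chart) if e["waist"][0] <= waist_size <= e["waist"][1]}
--     H = {i for i, e in enumerate(chart) if e["height"][0] <= height <= e["height"][1]}
--     for level in (B & W & H, (B & W) | (B & H) | (W & H), B | W | H):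
--         if level:
--             return [e["size"] for i, e in enumerate(chart) if i in level]
--     return []
-- ===== Notes on version B (the rewrite author's own statement) =====
-- stated objective: alternative
-- what changed: Replaces per-entry scoring plus sort-and-read-top with set algebra: three criterion index-sets (bust/waist/height matches) are built once, and the relaxation levels exact match (B&W&H), any two ((B&W)|(B&H)|(W&H)) and any one (B|W|H) are probed in order; the first nonempty level is reported in chart order, so no score, no max and no sort is computed.
import Mathlib
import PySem

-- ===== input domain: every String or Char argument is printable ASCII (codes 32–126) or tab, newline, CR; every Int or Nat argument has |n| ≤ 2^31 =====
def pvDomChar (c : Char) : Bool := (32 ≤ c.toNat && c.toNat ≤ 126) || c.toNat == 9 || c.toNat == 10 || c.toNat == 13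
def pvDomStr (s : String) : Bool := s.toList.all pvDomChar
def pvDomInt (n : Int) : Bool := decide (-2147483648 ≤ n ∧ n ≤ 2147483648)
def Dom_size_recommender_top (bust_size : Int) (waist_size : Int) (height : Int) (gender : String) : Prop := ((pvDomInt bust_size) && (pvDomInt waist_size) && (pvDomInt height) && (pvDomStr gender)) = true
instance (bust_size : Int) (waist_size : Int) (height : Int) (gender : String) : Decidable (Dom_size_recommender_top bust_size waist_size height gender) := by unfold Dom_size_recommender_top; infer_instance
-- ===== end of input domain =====

-- B replaces A's score-sort-read-top pipeline by set algebra on the three criterion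
-- index-sets, probed at the relaxation levels all-three / any-two / any-one; same return value everywhere.

-- module-level chart constants (shared data, used by both ports):
-- each entry is (size, (bust range, waist range, height range))
def w_top_size_chart : List (String × (Int × Int) × (Int × Int) × (Int × Int)) :=
  [("XS", (74, 80), (57, 63), (149, 156)),
   ("S", (77, 83), (60, 66), (153, 160)),
   ("M", (80, 86), (63, 69), (153, 160)),
   ("L", (86, 92), (69, 75), (159, 166)),
   ("XL", (92, 98), (75, 81), (159, 166)),
   ("XXL", (98, 104), (81, 87), (159, 166)),
   ("3XL", (104, 110), (87, 93), (159, 166))]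

def m_top_size_chart : List (String × (Int × Int) × (Int × Int) × (Int × Int)) :=
  [("XS", (78, 84), (66, 72), (155, 165)),
   ("S", (80, 88), (68, 76), (155, 165)),
   ("M", (88, 96), (76, 84), (165, 175)),
   ("L", (96, 104), (84, 92), (175, 185)),
   ("XL", (104, 112), (92, 100), (175, 185)),
   ("XXL", (112, 120), (100, 108), (175, 185)),
   ("3XL", (120, 128), (108, 116), (175, 185)),
   ("4XL", (128, 136), (116, 124), (175, 185))]

-- ===== PORT A =====
-- in_range(value, range_tuple)
def pvInRange (value : Int) (range_tuple : Int × Int) : Bool :=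
  decide (range_tuple.1 ≤ value) && decide (value ≤ range_tuple.2)

-- the loop body's score accumulation (score = 0; three 'score += 1' steps)
def aEntryScore (bust_size : Int) (waist_size : Int) (height : Int)
    (size : String × (Int × Int) × (Int × Int) × (Int × Int)) : Int :=
  let score : Int := 0
  let score := if pvInRange bust_size size.2.1 then score + 1 else score
  let score := if pvInRange waist_size size.2.2.1 then score + 1 else score
  let score := if pvInRange height size.2.2.2 then score + 1 else score
  score

def size_recommender_top (bust_size : Int) (waist_size : Int) (height : Int) (gender : String) : List String :=
  let size_chart := if gender == "F" then w_top_size_chart else m_top_size_chart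
  let matching_sizes : List (String × Int) :=
    size_chart.foldl (fun acc size =>
      let score := aEntryScore bust_size waist_size height size
      if score > 0 then acc ++ [(size.1, score)] else acc) []
  let matching_sizes := PySem.List.sorted matching_sizes (fun x => x.2) true
  match matching_sizes with
  | [] => []
  | top :: _ => (matching_sizes.filter (fun size => size.2 == top.2)).map (fun size => size.1)

-- ===== PORT B =====
-- {i for i, e in enumerate(chart) if lo <= v <= hi}   (a Python set of indices)
def critIdxSet (chart : List (String × (Int × Int) × (Int × Int) × (Int × Int)))
    (test : (String × (Int × Int) × (Int × Int) × (Int × Int)) → Bool) : PySem.Set Int :=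
  PySem.Set.ofList (((PySem.List.enumerate chart).filter (fun p => test p.2)).map (fun p => p.1))

-- [e["size"] for i, e in enumerate(chart) if i in level]
def pickLevel (chart : List (String × (Int × Int) × (Int × Int) × (Int × Int)))
    (level : PySem.Set Int) : List String :=
  ((PySem.List.enumerate chart).filter (fun p => PySem.Set.contains level p.1)).map (fun p => p.2.1)

-- body of B after the chart selection: the three criterion sets, then the
-- for-loop over the 3-tuple of levels with early return (= chained ifs)
def altCore (bust_size : Int) (waist_size : Int) (height : Int)
    (chart : List (String × (Int × Int) × (Int × Int) × (Int × Int))) : List String :=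
  let B := critIdxSet chart (fun e => decide ((e.2.1).1 ≤ bust_size) && decide (bust_size ≤ (e.2.1).2))
  let W := critIdxSet chart (fun e => decide ((e.2.2.1).1 ≤ waist_size) && decide (waist_size ≤ (e.2.2.1).2))
  let H := critIdxSet chart (fun e => decide ((e.2.2.2).1 ≤ height) && decide (height ≤ (e.2.2.2).2))
  let l1 := PySem.Set.inter (PySem.Set.inter B W) H
  let l2 := PySem.Set.union (PySem.Set.union (PySem.Set.inter B W) (PySem.Set.inter B H)) (PySem.Set.inter W H)
  let l3 := PySem.Set.union (PySem.Set.union B W) H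
  if !l1.isEmpty then pickLevel chart l1
  else if !l2.isEmpty then pickLevel chart l2
  else if !l3.isEmpty then pickLevel chart l3
  else []

def size_recommender_top_alt (bust_size : Int) (waist_size : Int) (height : Int) (gender : String) : List String :=
  altCore bust_size waist_size height (if gender == "F" then w_top_size_chart else m_top_size_chart)

-- ===== PRECONDITION & SPEC =====
def Spec_size_recommender_top (bust_size : Int) (waist_size : Int) (height : Int) (gender : String) (out : List String) : Prop := out = size_recommender_top_alt bust_size waist_size height gender
instance (bust_size : Int) (waist_size : Int) (height : Int) (gender : String) (out : List String) : Decidable (Spec_size_recommender_top bust_size waist_size height gender out) := by unfold Spec_size_recommender_top; infer_instance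

-- ===== CLAIM (what is proved, stated in full; the proofs are below) =====
def Claim_equal_size_recommender_top : Prop := ∀ (bust_size : Int) (waist_size : Int) (height : Int) (gender : String), Dom_size_recommender_top bust_size waist_size height gender → Spec_size_recommender_top bust_size waist_size height gender (size_recommender_top bust_size waist_size height gender)

-- ===== LEMMAS AND PROOFS =====

-- A's result in canonical form: the names of the entries whose score equals the
-- running maximum (0 meaning "no match").  Both ports are reduced to this.
def maxFilter (l : List (String × Int)) : List String :=
  let best : Int := l.foldl (fun best p => max best p.2) 0
  if best == 0 then []
  else (l.filter (fun p => p.2 == best)).map (fun p => p.1)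

-- Stability of Python's sort, specialised to one key value
theorem filter_insertBy_key_eq {α : Type} (key : α → Int) (c : Int) (x : α) (ys : List α)
    (hp : ys.Pairwise (fun a b => key b ≤ key a)) :
    (PySem.List.insertBy (fun a b => decide (key b < key a)) x ys).filter (fun y => key y == c)
      = ys.filter (fun y => key y == c) ++ (if key x == c then [x] else []) := by
  induction ys with
  | nil => by_cases h : key x = c <;> simp [PySem.List.insertBy, h]
  | cons y ys ih =>
    rcases List.pairwise_cons.mp hp with ⟨hy, hys⟩
    by_cases hfire : key y < key x
    · have heq : PySem.List.insertBy (fun a b => decide (key b < key a)) x (y :: ys)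
          = x :: y :: ys := by simp [PySem.List.insertBy, hfire]
      rw [heq]
      by_cases hxc : key x = c
      · have hnil : (y :: ys).filter (fun y => key y == c) = [] := by
          rw [List.filter_eq_nil_iff]
          intro z hz
          have hle : key z ≤ key y := by
            rcases List.mem_cons.mp hz with rfl | hz'
            · exact le_refl _
            · exact hy z hz'
          simp only [beq_iff_eq]
          omega
        rw [List.filter_cons_of_pos (by simp [hxc]), hnil]
        simp [hxc]
      · rw [List.filter_cons_of_neg (by simp [hxc])]
        simp [hxc]
    · have heq : PySem.List.insertBy (fun a b => decide (key b < key a)) x (y :: ys)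
          = y :: PySem.List.insertBy (fun a b => decide (key b < key a)) x ys := by
        simp [PySem.List.insertBy, hfire]
      rw [heq, List.filter_cons, ih hys, List.filter_cons]
      by_cases hyc : key y = c <;> simp [hyc]

-- One-key filter commutes with Python's stable reverse sort.
theorem filter_sorted_rev_key_eq {α : Type} (key : α → Int) (c : Int) (xs : List α) :
    (PySem.List.sorted xs key true).filter (fun y => key y == c)
      = xs.filter (fun y => key y == c) := by
  induction xs using List.reverseRecOn with
  | nil => rfl
  | append_singleton xs x ih =>
    have hstep : PySem.List.sorted (xs ++ [x]) key true
        = PySem.List.insertBy (fun a b => decide (key b < key a)) x (PySem.List.sorted xs key true) := by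
      rw [PySem.List.sorted_rev_eq_foldl_insertBy, PySem.List.sorted_rev_eq_foldl_insertBy,
        List.foldl_append]
      rfl
    rw [hstep,
      filter_insertBy_key_eq key c x _ (PySem.List.sorted_pairwise_rev xs key),
      ih, List.filter_append, List.filter_cons]
    simp

-- The A-side core: sort-then-read-top on the positive-score sublist equals maxFilter.
theorem core_eq (l : List (String × Int)) :
    (let ms := PySem.List.sorted (l.filter (fun p => p.2 > 0)) (fun x => x.2) true
     match ms with
     | [] => ([] : List String)
     | top :: _ => (ms.filter (fun size => size.2 == top.2)).map (fun size => size.1))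
      = maxFilter l := by
  simp only [maxFilter]
  set best : Int := l.foldl (fun best p => max best p.2) 0 with hbest
  have hfold : best = (l.map (fun p => p.2)).foldl max 0 := by
    rw [hbest, List.foldl_map]
  have hub : ∀ p ∈ l, p.2 ≤ best := by
    intro p hp
    rw [hfold]
    exact (PySem.List.le_foldl_max _ 0).2 _ (List.mem_map_of_mem hp)
  have hnn : (0 : Int) ≤ best := by
    rw [hfold]; exact (PySem.List.le_foldl_max _ 0).1
  by_cases hzero : best = 0
  · have hfil : l.filter (fun p => p.2 > 0) = [] := by
      rw [List.filter_eq_nil_iff]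
      intro p hp
      have := hub p hp
      simp only [gt_iff_lt, decide_eq_true_eq, not_lt]
      omega
    rw [hfil]
    simp [hzero, PySem.List.sorted]
  · have hmem : best ∈ l.map (fun p => p.2) := by
      rcases PySem.List.foldl_max_mem (l.map (fun p => p.2)) 0 with h | h
      · rw [hfold] at hzero; exact absurd h hzero
      · rw [hfold]; exact h
    rcases List.mem_map.mp hmem with ⟨q, hq, hqbest⟩
    have hpos : 0 < best := lt_of_le_of_ne hnn (Ne.symm hzero)
    have hqpos : q ∈ l.filter (fun p => p.2 > 0) := by
      rw [List.mem_filter]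
      exact ⟨hq, by simp [hqbest, hpos]⟩
    rcases hsorted : PySem.List.sorted (l.filter (fun p => p.2 > 0)) (fun x => x.2) true with _ | ⟨top, rest⟩
    · exact absurd ((PySem.List.sorted_eq_nil_iff _ _ _).mp hsorted ▸ hqpos) (List.not_mem_nil)
    · simp only [hsorted]
      have htop_mem : top ∈ l.filter (fun p => p.2 > 0) := by
        rw [← PySem.List.mem_sorted _ (fun x => x.2) true, hsorted]
        exact List.mem_cons_self
      have htop_ub : top.2 ≤ best := hub top (List.mem_filter.mp htop_mem).1
      have htop_ge : best ≤ top.2 := by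
        have h := PySem.List.key_head_sorted_rev_ge _ (fun x => x.2) hsorted q hqpos
        simp only at h
        omega
      have htop : top.2 = best := le_antisymm htop_ub htop_ge
      rw [if_neg (by simpa using hzero)]
      have hstab := filter_sorted_rev_key_eq (fun x : String × Int => x.2) best
        (l.filter (fun p => p.2 > 0))
      simp only at hstab
      rw [htop, ← hsorted, hstab]
      congr 1
      rw [List.filter_filter]
      apply List.filter_congr
      intro p hp
      by_cases h : p.2 = best
      · simp [h, hpos]
      · simp [beq_iff_eq, h]

-- ===== B-side lemmas =====

-- the list comprehension behind a criterion set / a pick, pushed through 'enumerate'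
theorem map_filter_enumerate {α β : Type} (xs : List α) (s : Int) (P : α → Bool) (f : α → β) :
    (((PySem.List.enumerate xs s).filter (fun p => P p.2)).map (fun p => f p.2))
      = (xs.filter P).map f := by
  induction xs generalizing s with
  | nil => rfl
  | cons x xs ih =>
    rw [PySem.List.enumerate_cons, List.filter_cons, List.filter_cons]
    by_cases h : P x = true <;> simp [h, ih]

theorem mem_critIdxSet (chart : List (String × (Int × Int) × (Int × Int) × (Int × Int)))
    (t : (String × (Int × Int) × (Int × Int) × (Int × Int)) → Bool) (i : Int) :
    i ∈ critIdxSet chart t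
      ↔ ∃ (k : Nat) (hk : k < chart.length), i = (k : Int) ∧ t (chart[k]'hk) = true := by
  unfold critIdxSet
  rw [PySem.Set.mem_ofList]
  constructor
  · intro hmem
    rcases List.mem_map.mp hmem with ⟨p, hpf, rfl⟩
    rcases List.mem_filter.mp hpf with ⟨hpe, hpt⟩
    rcases (PySem.List.mem_enumerate_iff _ _ _).mp hpe with ⟨k, hk, rfl⟩
    exact ⟨k, hk, by simp, by simpa using hpt⟩
  · rintro ⟨k, hk, rfl, ht⟩
    apply List.mem_map.mpr
    refine ⟨((k : Int), chart[k]'hk), List.mem_filter.mpr ⟨?_, by simpa using ht⟩, rfl⟩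
    exact (PySem.List.mem_enumerate_iff _ _ _).mpr ⟨k, hk, by simp⟩

theorem critIdxSet_at_index (chart : List (String × (Int × Int) × (Int × Int) × (Int × Int)))
    (t : (String × (Int × Int) × (Int × Int) × (Int × Int)) → Bool)
    (k : Nat) (hk : k < chart.length) :
    ((k : Int) ∈ critIdxSet chart t) ↔ t (chart[k]'hk) = true := by
  rw [mem_critIdxSet]
  constructor
  · rintro ⟨k', hk', hkk, ht⟩
    have : k = k' := by exact_mod_cast hkk
    subst this; exact ht
  · intro ht; exact ⟨k, hk, rfl, ht⟩

-- ===== putting B into maxFilter form =====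

theorem altCore_eq (bust_size waist_size height : Int)
    (chart : List (String × (Int × Int) × (Int × Int) × (Int × Int))) :
    altCore bust_size waist_size height chart
      = maxFilter (chart.map (fun e => (e.1, aEntryScore bust_size waist_size height e))) := by
  -- abbreviations
  set t1 := fun e : String × (Int × Int) × (Int × Int) × (Int × Int) =>
      decide ((e.2.1).1 ≤ bust_size) && decide (bust_size ≤ (e.2.1).2) with ht1
  set t2 := fun e : String × (Int × Int) × (Int × Int) × (Int × Int) =>
      decide ((e.2.2.1).1 ≤ waist_size) && decide (waist_size ≤ (e.2.2.1).2) with ht2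
  set t3 := fun e : String × (Int × Int) × (Int × Int) × (Int × Int) =>
      decide ((e.2.2.2).1 ≤ height) && decide (height ≤ (e.2.2.2).2) with ht3
  have hscore : ∀ e, aEntryScore bust_size waist_size height e
      = (if t1 e then (1:Int) else 0) + (if t2 e then 1 else 0) + (if t3 e then 1 else 0) := by
    intro e
    simp only [aEntryScore, pvInRange, ht1, ht2, ht3]
    split_ifs <;> omega
  have hp1 : ∀ e, ((t1 e && t2 e && t3 e) = true) ↔ aEntryScore bust_size waist_size height e = 3 := by
    intro e; rw [hscore e]; cases h1 : t1 e <;> cases h2 : t2 e <;> cases h3 : t3 e <;> simp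
  have hp2 : ∀ e, ((t1 e && t2 e || t1 e && t3 e || t2 e && t3 e) = true)
      ↔ 2 ≤ aEntryScore bust_size waist_size height e := by
    intro e; rw [hscore e]; cases h1 : t1 e <;> cases h2 : t2 e <;> cases h3 : t3 e <;> simp <;> omega
  have hp3 : ∀ e, ((t1 e || t2 e || t3 e) = true) ↔ 1 ≤ aEntryScore bust_size waist_size height e := by
    intro e; rw [hscore e]; cases h1 : t1 e <;> cases h2 : t2 e <;> cases h3 : t3 e <;> simp <;> omega
  have hsub : ∀ e, aEntryScore bust_size waist_size height e ≤ 3 := by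
    intro e; rw [hscore e]; split_ifs <;> omega
  unfold altCore
  simp only [← ht1, ← ht2, ← ht3]
  set B := critIdxSet chart t1 with hB
  set W := critIdxSet chart t2 with hW
  set H := critIdxSet chart t3 with hH
  have hm1 : ∀ i, i ∈ PySem.Set.inter (PySem.Set.inter B W) H
      ↔ ∃ (k : Nat) (hk : k < chart.length), i = (k : Int)
          ∧ aEntryScore bust_size waist_size height (chart[k]'hk) = 3 := by
    intro i
    rw [PySem.Set.mem_inter, PySem.Set.mem_inter, hB, hW, hH]
    constructor
    · rintro ⟨⟨h1, h2⟩, h3⟩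
      rcases (mem_critIdxSet chart t1 i).mp h1 with ⟨k, hk, rfl, ht1'⟩
      refine ⟨k, hk, rfl, (hp1 _).mp ?_⟩
      have h2' := (critIdxSet_at_index chart t2 k hk).mp h2
      have h3' := (critIdxSet_at_index chart t3 k hk).mp h3
      simp [ht1', h2', h3']
    · rintro ⟨k, hk, rfl, hs⟩
      have h := (hp1 _).mpr hs
      simp only [Bool.and_eq_true] at h
      exact ⟨⟨(critIdxSet_at_index chart t1 k hk).mpr h.1.1,
             (critIdxSet_at_index chart t2 k hk).mpr h.1.2⟩,
             (critIdxSet_at_index chart t3 k hk).mpr h.2⟩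
  have hm2 : ∀ i, i ∈ PySem.Set.union (PySem.Set.union (PySem.Set.inter B W) (PySem.Set.inter B H)) (PySem.Set.inter W H)
      ↔ ∃ (k : Nat) (hk : k < chart.length), i = (k : Int)
          ∧ 2 ≤ aEntryScore bust_size waist_size height (chart[k]'hk) := by
    intro i
    rw [PySem.Set.mem_union, PySem.Set.mem_union, PySem.Set.mem_inter, PySem.Set.mem_inter,
      PySem.Set.mem_inter, hB, hW, hH]
    constructor
    · intro h
      have hidx : ∃ (k : Nat) (hk : k < chart.length), i = (k : Int) := by
        rcases h with (⟨h', _⟩ | ⟨h', _⟩) | ⟨h', _⟩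
        · rcases (mem_critIdxSet chart t1 i).mp h' with ⟨k, hk, rfl, _⟩; exact ⟨k, hk, rfl⟩
        · rcases (mem_critIdxSet chart t1 i).mp h' with ⟨k, hk, rfl, _⟩; exact ⟨k, hk, rfl⟩
        · rcases (mem_critIdxSet chart t2 i).mp h' with ⟨k, hk, rfl, _⟩; exact ⟨k, hk, rfl⟩
      rcases hidx with ⟨k, hk, rfl⟩
      refine ⟨k, hk, rfl, (hp2 _).mp ?_⟩
      rcases h with (⟨h1, h2⟩ | ⟨h1, h3⟩) | ⟨h2, h3⟩
      · simp [(critIdxSet_at_index chart t1 k hk).mp h1, (critIdxSet_at_index chart t2 k hk).mp h2]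
      · simp [(critIdxSet_at_index chart t1 k hk).mp h1, (critIdxSet_at_index chart t3 k hk).mp h3]
      · simp [(critIdxSet_at_index chart t2 k hk).mp h2, (critIdxSet_at_index chart t3 k hk).mp h3]
    · rintro ⟨k, hk, rfl, hs⟩
      have h := (hp2 _).mpr hs
      simp only [Bool.or_eq_true, Bool.and_eq_true] at h
      rcases h with (⟨ha, hb⟩ | ⟨ha, hb⟩) | ⟨ha, hb⟩
      · exact Or.inl (Or.inl ⟨(critIdxSet_at_index chart t1 k hk).mpr ha,
          (critIdxSet_at_index chart t2 k hk).mpr hb⟩)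
      · exact Or.inl (Or.inr ⟨(critIdxSet_at_index chart t1 k hk).mpr ha,
          (critIdxSet_at_index chart t3 k hk).mpr hb⟩)
      · exact Or.inr ⟨(critIdxSet_at_index chart t2 k hk).mpr ha,
          (critIdxSet_at_index chart t3 k hk).mpr hb⟩
  have hm3 : ∀ i, i ∈ PySem.Set.union (PySem.Set.union B W) H
      ↔ ∃ (k : Nat) (hk : k < chart.length), i = (k : Int)
          ∧ 1 ≤ aEntryScore bust_size waist_size height (chart[k]'hk) := by
    intro i
    rw [PySem.Set.mem_union, PySem.Set.mem_union, hB, hW, hH]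
    constructor
    · intro h
      have hidx : ∃ (k : Nat) (hk : k < chart.length), i = (k : Int) := by
        rcases h with (h' | h') | h'
        · rcases (mem_critIdxSet chart t1 i).mp h' with ⟨k, hk, rfl, _⟩; exact ⟨k, hk, rfl⟩
        · rcases (mem_critIdxSet chart t2 i).mp h' with ⟨k, hk, rfl, _⟩; exact ⟨k, hk, rfl⟩
        · rcases (mem_critIdxSet chart t3 i).mp h' with ⟨k, hk, rfl, _⟩; exact ⟨k, hk, rfl⟩
      rcases hidx with ⟨k, hk, rfl⟩
      refine ⟨k, hk, rfl, (hp3 _).mp ?_⟩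
      rcases h with (h' | h') | h'
      · simp [(critIdxSet_at_index chart t1 k hk).mp h']
      · simp [(critIdxSet_at_index chart t2 k hk).mp h']
      · simp [(critIdxSet_at_index chart t3 k hk).mp h']
    · rintro ⟨k, hk, rfl, hs⟩
      have h := (hp3 _).mpr hs
      simp only [Bool.or_eq_true] at h
      rcases h with (ha | ha) | ha
      · exact Or.inl (Or.inl ((critIdxSet_at_index chart t1 k hk).mpr ha))
      · exact Or.inl (Or.inr ((critIdxSet_at_index chart t2 k hk).mpr ha))
      · exact Or.inr ((critIdxSet_at_index chart t3 k hk).mpr ha)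
  -- generic consequences of such a membership characterisation
  have hempty : ∀ (L : PySem.Set Int) (c : Int),
      (∀ i, i ∈ L ↔ ∃ (k : Nat) (hk : k < chart.length), i = (k : Int)
          ∧ c ≤ aEntryScore bust_size waist_size height (chart[k]'hk)) →
      (L.isEmpty = true ↔ ∀ e ∈ chart, ¬ c ≤ aEntryScore bust_size waist_size height e) := by
    intro L c hchar
    rw [List.isEmpty_iff, List.eq_nil_iff_forall_not_mem]
    constructor
    · intro hnone e he hc
      rcases List.mem_iff_getElem.mp he with ⟨k, hk, rfl⟩
      exact hnone (k : Int) ((hchar _).mpr ⟨k, hk, rfl, hc⟩)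
    · intro hall i hi
      rcases (hchar i).mp hi with ⟨k, hk, rfl, hc⟩
      exact hall _ (List.getElem_mem hk) hc
  have hpick : ∀ (L : PySem.Set Int) (c : Int),
      (∀ i, i ∈ L ↔ ∃ (k : Nat) (hk : k < chart.length), i = (k : Int)
          ∧ c ≤ aEntryScore bust_size waist_size height (chart[k]'hk)) →
      pickLevel chart L
        = (chart.filter (fun e => decide (c ≤ aEntryScore bust_size waist_size height e))).map (fun e => e.1) := by
    intro L c hchar
    unfold pickLevel
    have hcongr : (PySem.List.enumerate chart (0:Int)).filter (fun p => PySem.Set.contains L p.1)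
        = (PySem.List.enumerate chart (0:Int)).filter
            (fun p => decide (c ≤ aEntryScore bust_size waist_size height p.2)) := by
      apply List.filter_congr
      intro p hp
      rcases (PySem.List.mem_enumerate_iff _ _ _).mp hp with ⟨k, hk, rfl⟩
      simp only [Int.zero_add]
      by_cases hc : c ≤ aEntryScore bust_size waist_size height (chart[k]'hk)
      · have hmem : ((k : Int)) ∈ L := (hchar _).mpr ⟨k, hk, rfl, hc⟩
        simp [hc, hmem]
      · have : ¬ ((k : Int)) ∈ L := by
          intro hmem
          rcases (hchar _).mp hmem with ⟨k', hk', hkk, hc'⟩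
          have : k = k' := by exact_mod_cast hkk
          subst this; exact hc hc'
        simp [hc, this]
    rw [hcongr]
    exact map_filter_enumerate chart 0 (fun e => decide (c ≤ aEntryScore bust_size waist_size height e)) (fun e => e.1)
  -- the exact-equality characterisation needed for the first level (score = 3)
  have hm1' : ∀ i, i ∈ PySem.Set.inter (PySem.Set.inter B W) H
      ↔ ∃ (k : Nat) (hk : k < chart.length), i = (k : Int)
          ∧ 3 ≤ aEntryScore bust_size waist_size height (chart[k]'hk) := by
    intro i
    rw [hm1 i]
    constructor
    · rintro ⟨k, hk, rfl, hs⟩; exact ⟨k, hk, rfl, by omega⟩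
    · rintro ⟨k, hk, rfl, hs⟩; exact ⟨k, hk, rfl, by have := hsub (chart[k]'hk); omega⟩
  -- the maximum
  set scored := chart.map (fun e => (e.1, aEntryScore bust_size waist_size height e)) with hscored
  simp only [maxFilter]
  set best : Int := scored.foldl (fun best p => max best p.2) 0 with hbest
  have hfold : best = (chart.map (fun e => aEntryScore bust_size waist_size height e)).foldl max 0 := by
    rw [hbest, hscored, List.foldl_map, List.foldl_map]
  have hub : ∀ e ∈ chart, aEntryScore bust_size waist_size height e ≤ best := by
    intro e he
    rw [hfold]
    exact (PySem.List.le_foldl_max _ 0).2 _ (List.mem_map_of_mem he)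
  have hnn : (0 : Int) ≤ best := by
    rw [hfold]; exact (PySem.List.le_foldl_max _ 0).1
  have hbub : best ≤ 3 := by
    rw [hfold]
    rcases PySem.List.foldl_max_mem (chart.map (fun e => aEntryScore bust_size waist_size height e)) 0 with h | h
    · rw [h]; omega
    · rcases List.mem_map.mp h with ⟨e, _, hee⟩
      have := hsub e
      omega
  have hatt : best ≠ 0 → ∃ e ∈ chart, aEntryScore bust_size waist_size height e = best := by
    intro hz
    rcases PySem.List.foldl_max_mem (chart.map (fun e => aEntryScore bust_size waist_size height e)) 0 with h | h
    · rw [hfold] at hz; exact absurd h hz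
    · rcases List.mem_map.mp h with ⟨e, he, hee⟩
      exact ⟨e, he, by rw [hfold]; exact hee⟩
  -- filter of scored = filter of chart, mapped
  have hfilt : ∀ c : Int, (scored.filter (fun p => p.2 == c)).map (fun p => p.1)
      = (chart.filter (fun e => aEntryScore bust_size waist_size height e == c)).map (fun e => e.1) := by
    intro c
    rw [hscored, List.filter_map, List.map_map]
    rfl
  -- equality-vs-threshold filters agree on chart members (all scores ≤ best)
  have hfc : ∀ c : Int, best = c →
      chart.filter (fun e => decide (c ≤ aEntryScore bust_size waist_size height e))
        = chart.filter (fun e => aEntryScore bust_size waist_size height e == c) := by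
    intro c hc
    apply List.filter_congr
    intro e he
    have := hub e he
    by_cases h : aEntryScore bust_size waist_size height e = c
    · simp [h]
    · have : ¬ c ≤ aEntryScore bust_size waist_size height e := by omega
      simp [this, beq_iff_eq, h]
  -- case analysis on best ∈ {0,1,2,3}
  have hcases : best = 0 ∨ best = 1 ∨ best = 2 ∨ best = 3 := by omega
  rcases hcases with h0 | h1 | h2 | h3
  · -- no match: every level is empty
    have he1 : (PySem.Set.inter (PySem.Set.inter B W) H).isEmpty = true :=
      (hempty _ 3 hm1').mpr (fun e he => by have := hub e he; omega)
    have he2 : (PySem.Set.union (PySem.Set.union (PySem.Set.inter B W) (PySem.Set.inter B H)) (PySem.Set.inter W H)).isEmpty = true :=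
      (hempty _ 2 hm2).mpr (fun e he => by have := hub e he; omega)
    have he3 : (PySem.Set.union (PySem.Set.union B W) H).isEmpty = true :=
      (hempty _ 1 hm3).mpr (fun e he => by have := hub e he; omega)
    simp [he1, he2, he3, h0]
  · -- best = 1: levels 3 and 2 empty, level 1 nonempty
    have he1 : (PySem.Set.inter (PySem.Set.inter B W) H).isEmpty = true :=
      (hempty _ 3 hm1').mpr (fun e he => by have := hub e he; omega)
    have he2 : (PySem.Set.union (PySem.Set.union (PySem.Set.inter B W) (PySem.Set.inter B H)) (PySem.Set.inter W H)).isEmpty = true :=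
      (hempty _ 2 hm2).mpr (fun e he => by have := hub e he; omega)
    have he3 : (PySem.Set.union (PySem.Set.union B W) H).isEmpty = false := by
      cases h : (PySem.Set.union (PySem.Set.union B W) H).isEmpty
      · rfl
      · rcases hatt (by omega) with ⟨e, he, hse⟩
        exact absurd ((hempty _ 1 hm3).mp h e he) (by omega)
    simp [he1, he2, he3, h1, hpick _ 1 hm3, hfilt 1, hfc 1 h1]
  · -- best = 2
    have he1 : (PySem.Set.inter (PySem.Set.inter B W) H).isEmpty = true :=
      (hempty _ 3 hm1').mpr (fun e he => by have := hub e he; omega)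
    have he2 : (PySem.Set.union (PySem.Set.union (PySem.Set.inter B W) (PySem.Set.inter B H)) (PySem.Set.inter W H)).isEmpty = false := by
      cases h : (PySem.Set.union (PySem.Set.union (PySem.Set.inter B W) (PySem.Set.inter B H)) (PySem.Set.inter W H)).isEmpty
      · rfl
      · rcases hatt (by omega) with ⟨e, he, hse⟩
        exact absurd ((hempty _ 2 hm2).mp h e he) (by omega)
    simp [he1, he2, h2, hpick _ 2 hm2, hfilt 2, hfc 2 h2]
  · -- best = 3
    have he1 : (PySem.Set.inter (PySem.Set.inter B W) H).isEmpty = false := by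
      cases h : (PySem.Set.inter (PySem.Set.inter B W) H).isEmpty
      · rfl
      · rcases hatt (by omega) with ⟨e, he, hse⟩
        exact absurd ((hempty _ 3 hm1').mp h e he) (by omega)
    simp [he1, h3, hpick _ 3 hm1', hfilt 3, hfc 3 h3]

-- ===== VERDICT (by name: the statement is the Claim_ definition above) =====
theorem size_recommender_top_spec : Claim_equal_size_recommender_top := by
  intro bust_size waist_size height gender _
  show size_recommender_top bust_size waist_size height gender
      = size_recommender_top_alt bust_size waist_size height gender
  unfold size_recommender_top size_recommender_top_alt
  simp only
  set chart := if gender == "F" then w_top_size_chart else m_top_size_chart with hchart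
  have hA : chart.foldl (fun acc size =>
      let score := aEntryScore bust_size waist_size height size
      if score > 0 then acc ++ [(size.1, score)] else acc) []
      = (chart.map (fun e => (e.1, aEntryScore bust_size waist_size height e))).filter
          (fun p => p.2 > 0) := by
    have hfold := PySem.List.foldl_append_ite
      (p := fun size => (aEntryScore bust_size waist_size height size) > 0)
      (f := fun size => (size.1, aEntryScore bust_size waist_size height size))
      (l := chart) (acc := ([] : List (String × Int)))
    rw [hfold, List.nil_append, List.filter_map]
    rfl
  rw [hA, core_eq, altCore_eq]
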